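-- pv_equiv track=rewrite | github.com/sunny-hong/MyPython | EPI/5.1_dutch-flag-partition-variant-three.py | array_three
-- ===== SOURCE A (Python) =====
-- def array_three(A):
--   if len(A)<1:
--     return A
--   store, store2, i = [A[0]], [], 0
--   A = A[1:]
--   while i<len(A):
--     if A[i] in store:
--       store.append(A.pop(i))
--     else:
--       if store2 == []:
--         store2 = [A.pop(i)]
--       elif A[i] in store2:
--         store2.append(A.pop(i))
--       else:
--         i += 1
--   return A+store+store2
-- ===== SOURCE B (Python) =====
-- def array_three(A):
--   if len(A) < 1:
--     return A
--   k1 = A[0]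
--   rest = A[1:]
--   k2 = next((x for x in rest if x != k1), None)
--   others, ones, twos = [], [k1], []
--   for x in rest:
--     if x == k1:
--       ones.append(x)
--     elif k2 is not None and x == k2:
--       twos.append(x)
--     else:
--       others.append(x)
--   return others + ones + twos
-- ===== Notes on version B (the rewrite author's own statement) =====
-- stated objective: faster
-- what changed: Replaces the quadratic while-loop that repeatedly pops matching elements out of the list (each pop shifting the tail) with a single pass that first finds the second key and then buckets every element into others/key1/key2 lists.
import Mathlib
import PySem

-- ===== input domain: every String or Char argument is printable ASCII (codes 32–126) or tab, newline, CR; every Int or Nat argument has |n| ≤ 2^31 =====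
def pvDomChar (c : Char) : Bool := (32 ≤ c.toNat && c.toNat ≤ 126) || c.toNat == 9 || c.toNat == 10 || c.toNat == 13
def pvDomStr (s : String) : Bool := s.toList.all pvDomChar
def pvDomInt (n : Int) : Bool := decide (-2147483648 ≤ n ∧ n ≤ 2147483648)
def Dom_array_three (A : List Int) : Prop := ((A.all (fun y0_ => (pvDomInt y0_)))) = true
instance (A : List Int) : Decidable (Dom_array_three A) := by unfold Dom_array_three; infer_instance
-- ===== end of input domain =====

-- B is a single pass (find key2, then bucket into three lists) instead of A's quadratic pop-loop; equal output everywhere.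

-- ===== PORT A =====
-- the while-loop of A: state is the mutated list A, store, store2 and index i
def a3loop (A store store2 : List Int) (i : Nat) : List Int :=
  if h : i < A.length then
    if A[i] ∈ store then
      a3loop (A.eraseIdx i) (store ++ [A[i]]) store2 i
    else if store2 = [] then
      a3loop (A.eraseIdx i) store [A[i]] i
    else if A[i] ∈ store2 then
      a3loop (A.eraseIdx i) store (store2 ++ [A[i]]) i
    else
      a3loop A store store2 (i + 1)
  else
    A ++ store ++ store2
termination_by A.length - i
decreasing_by
  · simp [List.length_eraseIdx, h]; omega
  · simp [List.length_eraseIdx, h]; omega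
  · simp [List.length_eraseIdx, h]; omega
  · omega

def array_three (A : List Int) : List Int :=
  if A.length < 1 then A
  else
    match A with
    | [] => A
    | a :: rest => a3loop rest [a] [] 0

-- ===== PORT B =====
def array_three_alt (A : List Int) : List Int :=
  match A with
  | [] => []
  | k1 :: rest =>
    let k2 := rest.find? (fun x => x ≠ k1)
    let st := rest.foldl
      (fun (acc : List Int × List Int × List Int) x =>
        if x = k1 then (acc.1, acc.2.1 ++ [x], acc.2.2)
        else if k2 = some x then (acc.1, acc.2.1, acc.2.2 ++ [x])
        else (acc.1 ++ [x], acc.2.1, acc.2.2))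
      ([], [k1], [])
    st.1 ++ st.2.1 ++ st.2.2

-- ===== PRECONDITION & SPEC =====
def Spec_array_three (A : List Int) (out : List Int) : Prop := out = array_three_alt A
instance (A : List Int) (out : List Int) : Decidable (Spec_array_three A out) := by unfold Spec_array_three; infer_instance

-- ===== CLAIM (what is proved, stated in full; the proofs are below) =====
def Claim_equal_array_three : Prop := ∀ (A : List Int), Dom_array_three A → Spec_array_three A (array_three A)

-- ===== LEMMAS AND PROOFS =====

-- phase 2 of A's loop: store2 nonempty; P is the already-kept prefix
theorem a3loop_phase2 (k1 k2 : Int) (hk : k1 ≠ k2) :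
    ∀ (S P store store2 : List Int),
      (∀ x, x ∈ store ↔ x = k1) → (∀ x, x ∈ store2 ↔ x = k2) →
      a3loop (P ++ S) store store2 P.length =
        P ++ S.filter (fun x => ¬(x = k1 ∨ x = k2)) ++
          (store ++ S.filter (fun x => x = k1)) ++
          (store2 ++ S.filter (fun x => x = k2)) := by
  intro S
  induction S with
  | nil =>
    intro P store store2 h1 h2
    rw [a3loop]
    simp
  | cons x S ih =>
    intro P store store2 h1 h2
    rw [a3loop]
    have hlen : P.length < (P ++ x :: S).length := by simp
    have hget : (P ++ x :: S)[P.length]'hlen = x := by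
      simp [List.getElem_append_right]
    have herase : (P ++ x :: S).eraseIdx P.length = P ++ S := by
      rw [List.eraseIdx_append, if_neg (by omega)]
      simp
    have hst2ne : store2 ≠ [] := by
      intro h; subst h; exact absurd ((h2 k2).mpr rfl) (by simp)
    simp only [dif_pos hlen, hget, herase]
    by_cases hx1 : x = k1
    · rw [if_pos ((h1 x).mpr hx1)]
      rw [ih P (store ++ [x]) store2 (by intro y; simp [h1 y, hx1]) h2]
      subst hx1
      simp [hk]
    · by_cases hx2 : x = k2
      · rw [if_neg (by simpa [h1 x] using hx1), if_neg hst2ne,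
            if_pos ((h2 x).mpr hx2)]
        rw [ih P store (store2 ++ [x]) h1 (by intro y; simp [h2 y, hx2])]
        subst hx2
        simp [hx1]
      · rw [if_neg (by simpa [h1 x] using hx1), if_neg hst2ne,
            if_neg (by simpa [h2 x] using hx2)]
        have hlen1 : P.length + 1 = (P ++ [x]).length := by simp
        have hre : P ++ x :: S = (P ++ [x]) ++ S := by simp
        rw [hlen1, hre, ih (P ++ [x]) store store2 h1 h2]
        simp [hx1, hx2]

-- phase 1 of A's loop: store2 still empty, index 0, all elements so far were k1
theorem a3loop_phase1 (k1 : Int) :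
    ∀ (S store : List Int), (∀ x, x ∈ store ↔ x = k1) →
      a3loop S store [] 0 =
        match S.find? (fun x => x ≠ k1) with
        | none => store ++ S
        | some k2 =>
            S.filter (fun x => ¬(x = k1 ∨ x = k2)) ++
              (store ++ S.filter (fun x => x = k1)) ++
              S.filter (fun x => x = k2) := by
  intro S
  induction S with
  | nil => intro store h1; rw [a3loop]; simp
  | cons x S ih =>
    intro store h1
    rw [a3loop]
    by_cases hx1 : x = k1
    · simp only [List.length_cons, Nat.zero_lt_succ, dif_pos, List.getElem_cons_zero,
        List.eraseIdx_cons_zero]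
      rw [if_pos ((h1 x).mpr hx1)]
      rw [ih (store ++ [x]) (by intro y; simp [h1 y, hx1])]
      have hf : (x :: S).find? (fun x => decide ¬(x = k1)) = S.find? (fun x => decide ¬(x = k1)) := by
        simp [hx1]
      rw [hf]
      cases hS : S.find? (fun x => decide ¬(x = k1)) with
      | none => simp
      | some k2 =>
        have hk2 : ¬(k2 = k1) := by
          have := List.find?_some hS
          simpa using this
        subst hx1
        simp [Ne.symm hk2]
    · simp only [List.length_cons, Nat.zero_lt_succ, dif_pos, List.getElem_cons_zero,
        List.eraseIdx_cons_zero]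
      rw [if_neg (by simpa [h1 x] using hx1), if_pos trivial]
      have h2 : ∀ y, y ∈ ([x] : List Int) ↔ y = x := by simp
      have := a3loop_phase2 k1 x (fun h => hx1 h.symm) S ([] : List Int) store [x] h1 h2
      simp only [List.nil_append, List.length_nil] at this
      rw [this]
      have hf : (x :: S).find? (fun x => decide ¬(x = k1)) = some x := by
        simp [hx1]
      rw [hf]
      simp [hx1]

-- B's fold, characterized
theorem alt_fold (k1 : Int) (k2 : Option Int) :
    ∀ (S o n t : List Int),
      S.foldl
        (fun (acc : List Int × List Int × List Int) x =>
          if x = k1 then (acc.1, acc.2.1 ++ [x], acc.2.2)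
          else if k2 = some x then (acc.1, acc.2.1, acc.2.2 ++ [x])
          else (acc.1 ++ [x], acc.2.1, acc.2.2))
        (o, n, t) =
      (o ++ S.filter (fun x => ¬(x = k1) ∧ ¬(k2 = some x)),
       n ++ S.filter (fun x => x = k1),
       t ++ S.filter (fun x => ¬(x = k1) ∧ k2 = some x)) := by
  intro S
  induction S with
  | nil => intro o n t; simp
  | cons x S ih =>
    intro o n t
    by_cases hx1 : x = k1
    · simp only [List.foldl_cons, if_pos hx1]
      rw [ih]
      simp [hx1]
    · by_cases hx2 : k2 = some x
      · simp only [List.foldl_cons, if_neg hx1, if_pos hx2]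
        rw [ih]
        simp [hx1, hx2]
      · simp only [List.foldl_cons, if_neg hx1, if_neg hx2]
        rw [ih]
        simp [hx1, hx2]

-- ===== VERDICT (by name: the statement is the Claim_ definition above) =====
theorem array_three_spec : Claim_equal_array_three := by
  unfold Claim_equal_array_three Spec_array_three
  intro A _
  match A with
  | [] => rfl
  | k1 :: rest =>
    simp only [array_three, array_three_alt, List.length_cons]
    rw [if_neg (by omega)]
    rw [a3loop_phase1 k1 rest [k1] (by simp)]
    rw [alt_fold]
    cases hf : rest.find? (fun x => decide ¬(x = k1)) with
    | none =>
      have hall : ∀ x ∈ rest, x = k1 := by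
        intro x hx
        have := List.find?_eq_none.mp hf x hx
        simpa using this
      have h1 : rest.filter (fun x => decide (¬(x = k1) ∧ ¬(none = some x))) = [] := by
        simp only [List.filter_eq_nil_iff]
        intro x hx; simp [hall x hx]
      have h2 : rest.filter (fun x => decide (x = k1)) = rest :=
        List.filter_eq_self.mpr (fun x hx => by simp [hall x hx])
      have h3 : rest.filter (fun x => decide (¬(x = k1) ∧ none = some x)) = [] := by
        simp only [List.filter_eq_nil_iff]; intro x hx; simp
      simp only [h1, h2, h3]
      simp
    | some k2 =>
      have hk2 : ¬(k2 = k1) := by simpa using List.find?_some hf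
      have e1 : rest.filter (fun x => decide ¬(x = k1 ∨ x = k2)) =
          rest.filter (fun x => decide (¬(x = k1) ∧ ¬(some k2 = some x))) := by
        apply List.filter_congr
        intro x _
        simp only [decide_eq_decide, not_or, Option.some.injEq]
        omega
      have e3 : rest.filter (fun x => decide (x = k2)) =
          rest.filter (fun x => decide (¬(x = k1) ∧ some k2 = some x)) := by
        apply List.filter_congr
        intro x _
        simp only [decide_eq_decide, Option.some.injEq]
        constructor
        · intro h; subst h; exact ⟨hk2, rfl⟩
        · rintro ⟨_, h⟩; omega
      dsimp only
      rw [e1, e3]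
      simp
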